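-- pv_equiv track=rewrite | github.com/gcheng9430/InterviewPrep | Lqr/10.py | find
-- ===== SOURCE A (Python) =====
-- import collections
--
-- def find(s,k):
--     rightDict = collections.defaultdict(int)
--     leftDict = collections.defaultdict(int)
--     res=0
--     # initiate right dict
--     for i in range(len(s)):
--         rightDict[s[i]]+=1
--     p=0
--     # move letters from right dict to left dict
--     while p<len(s):
--         count=0
--         c=s[p]
--         rightDict[c]=rightDict[c]-1
--         # remove key if no longer exist in right dict
--         if rightDict[c]==0:
--             rightDict.pop(c)
--         leftDict[c]+=1
--         # check each letter in left dict also exist in right dict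
--         for a in leftDict:
--             if a in rightDict:
--                 count=count+1
--         if count>k:
--             res=res+1
--         p+=1
--     return res
-- ===== SOURCE B (Python) =====
-- def find(s, k):
--     right = {}
--     for c in s:
--         right[c] = right.get(c, 0) + 1
--     left = {}
--     both = 0
--     res = 0
--     for c in s:
--         lc = left.get(c, 0)
--         rc = right[c] - 1
--         right[c] = rc
--         left[c] = lc + 1
--         if lc == 0 and rc > 0:
--             both += 1
--         elif lc > 0 and rc == 0:
--             both -= 1
--         if both > k:
--             res += 1
--     return res
-- ===== Notes on version B (the rewrite author's own statement) =====
-- stated objective: faster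
-- what changed: Instead of rescanning all of leftDict against rightDict at every position (O(alphabet) inner loop per step), B maintains a single running counter 'both' of letters currently present on both sides, updated in O(1) per step from the one letter that moved.
import Mathlib
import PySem

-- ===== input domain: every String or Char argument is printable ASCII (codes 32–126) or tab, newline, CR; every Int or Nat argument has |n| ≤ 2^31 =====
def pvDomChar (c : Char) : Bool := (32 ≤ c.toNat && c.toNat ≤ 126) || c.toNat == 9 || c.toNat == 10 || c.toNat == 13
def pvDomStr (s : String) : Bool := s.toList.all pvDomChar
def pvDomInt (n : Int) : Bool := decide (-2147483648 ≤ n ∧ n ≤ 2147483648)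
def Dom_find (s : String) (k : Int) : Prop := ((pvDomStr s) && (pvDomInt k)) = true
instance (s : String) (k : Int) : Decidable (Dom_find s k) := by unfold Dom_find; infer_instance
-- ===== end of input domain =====

-- B replaces A's per-position rescan of leftDict against rightDict by a running counter of
-- letters present on both sides, updated in O(1) per step (objective: faster).

-- ===== PORT A =====
-- one step of A's while loop; state = (rightDict, leftDict, res)
def stepA (k : Int) (st : PySem.Dict Char Int × PySem.Dict Char Int × Int) (c : Char) :
    PySem.Dict Char Int × PySem.Dict Char Int × Int :=
  let rd := st.1.insert c (st.1.getD c 0 - 1)          -- rightDict[c] = rightDict[c] - 1 (defaultdict)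
  let rd := if rd.getD c 0 = 0 then rd.erase c else rd -- if rightDict[c]==0: rightDict.pop(c)
  let ld := st.2.1.modify c 0 (· + 1)                  -- leftDict[c] += 1
  -- for a in leftDict: if a in rightDict: count += 1
  let count := ld.keys.foldl (fun cnt a => if rd.contains a then cnt + 1 else cnt) (0 : Int)
  (rd, ld, if count > k then st.2.2 + 1 else st.2.2)

def find (s : String) (k : Int) : Int :=
  let cs := s.toList
  -- for i in range(len(s)): rightDict[s[i]] += 1
  let rightDict : PySem.Dict Char Int :=
    (PySem.List.pyRange 0 (cs.length : Int) 1).foldl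
      (fun d i => d.modify (PySem.List.pyGetD cs i ' ') 0 (· + 1)) PySem.Dict.empty
  -- while p < len(s): … ; p += 1   (c = s[p])
  let st := (PySem.List.pyRange 0 (cs.length : Int) 1).foldl
      (fun st p => stepA k st (PySem.List.pyGetD cs p ' '))
      (rightDict, PySem.Dict.empty, (0 : Int))
  st.2.2

-- ===== PORT B =====
-- one step of B's loop; state = (right, left, both, res)
def stepB (k : Int) (st : PySem.Dict Char Int × PySem.Dict Char Int × Int × Int) (c : Char) :
    PySem.Dict Char Int × PySem.Dict Char Int × Int × Int :=
  let lc := st.2.1.getD c 0                 -- lc = left.get(c, 0)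
  let rc := st.1.getD c 0 - 1               -- rc = right[c] - 1 (key always present here)
  let right := st.1.insert c rc
  let left := st.2.1.insert c (lc + 1)
  let both := if lc = 0 ∧ rc > 0 then st.2.2.1 + 1
              else if lc > 0 ∧ rc = 0 then st.2.2.1 - 1 else st.2.2.1
  (right, left, both, if both > k then st.2.2.2 + 1 else st.2.2.2)

def find_alt (s : String) (k : Int) : Int :=
  let cs := s.toList
  -- for c in s: right[c] = right.get(c, 0) + 1
  let right : PySem.Dict Char Int :=
    cs.foldl (fun d c => d.insert c (d.getD c 0 + 1)) PySem.Dict.empty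
  let st := cs.foldl (stepB k) (right, PySem.Dict.empty, (0 : Int), (0 : Int))
  st.2.2.2

-- ===== PRECONDITION & SPEC =====
def Spec_find (s : String) (k : Int) (out : Int) : Prop := out = find_alt s k
instance (s : String) (k : Int) (out : Int) : Decidable (Spec_find s k out) := by unfold Spec_find; infer_instance

-- ===== CLAIM (what is proved, stated in full; the proofs are below) =====
def Claim_equal_find : Prop := ∀ (s : String) (k : Int), Dom_find s k → Spec_find s k (find s k)

-- ===== LEMMAS AND PROOFS =====

-- the predicate "letter occurs on both sides of the split pre / suf"
def bothP (pre suf : List Char) (c : Char) : Bool :=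
  decide (0 < pre.count c) && decide (0 < suf.count c)

-- Dict.erase: no lemmas in the prelude, so we prove the two lookups we need
theorem get?_erase_self {κ ν : Type} [BEq κ] [LawfulBEq κ] (d : PySem.Dict κ ν) (c : κ) :
    (d.erase c).get? c = none := by
  simp [PySem.Dict.erase, PySem.Dict.get?, List.find?_eq_none]

theorem get?_erase_of_ne {κ ν : Type} [BEq κ] [LawfulBEq κ] (d : PySem.Dict κ ν) {c a : κ}
    (h : a ≠ c) : (d.erase c).get? a = d.get? a := by
  simp only [PySem.Dict.erase, PySem.Dict.get?, List.find?_filter]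
  have hpred : (fun (q : κ × ν) => decide (((!q.1 == c) = true) ∧ ((q.1 == a) = true)))
      = (fun (q : κ × ν) => q.1 == a) := by
    funext q
    by_cases hq : q.1 = a
    · simp [hq, h]
    · simp [hq]
  rw [hpred]

theorem contains_erase_self {κ ν : Type} [BEq κ] [LawfulBEq κ] (d : PySem.Dict κ ν) (c : κ) :
    (d.erase c).contains c = false := by
  have := get?_erase_self d c
  rw [PySem.Dict.contains_eq_isSome_get?, this]
  rfl

theorem contains_erase_of_ne {κ ν : Type} [BEq κ] [LawfulBEq κ] (d : PySem.Dict κ ν) {c a : κ}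
    (h : a ≠ c) : (d.erase c).contains a = d.contains a := by
  rw [PySem.Dict.contains_eq_isSome_get?, PySem.Dict.contains_eq_isSome_get?,
      get?_erase_of_ne d h]

theorem getD_erase_self {κ ν : Type} [BEq κ] [LawfulBEq κ] (d : PySem.Dict κ ν) (c : κ) (d0 : ν) :
    (d.erase c).getD c d0 = d0 := by
  simp [PySem.Dict.getD, get?_erase_self]

theorem getD_erase_of_ne {κ ν : Type} [BEq κ] [LawfulBEq κ] (d : PySem.Dict κ ν) {c a : κ} (d0 : ν)
    (h : a ≠ c) : (d.erase c).getD a d0 = d.getD a d0 := by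
  simp [PySem.Dict.getD, get?_erase_of_ne d h]

-- countP over a nodup list when the predicate changes at a single element
theorem countP_one_point {l : List Char} (hnd : l.Nodup) {c : Char} (hc : c ∈ l)
    (p p' : Char → Bool) (h : ∀ a ∈ l, a ≠ c → p' a = p a) :
    (l.countP p' : Int) =
      (l.countP p : Int) + ((if p' c then 1 else 0) - (if p c then 1 else 0)) := by
  induction l with
  | nil => cases hc
  | cons x t ih =>
    rw [List.countP_cons, List.countP_cons]
    rcases List.mem_cons.mp hc with hcx | hct
    · have ht : ∀ a ∈ t, p' a = p a := by
        intro a ha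
        have hax : a ≠ c := fun hax => (List.nodup_cons.mp hnd).1 (hcx ▸ hax ▸ ha)
        exact h a (List.mem_cons_of_mem _ ha) hax
      rw [List.countP_congr (fun a ha => by rw [ht a ha])]
      rw [← hcx]
      push_cast
      by_cases h1 : p' c <;> by_cases h2 : p c <;> simp [h1, h2]
    · have hxc : x ≠ c := fun hxc => (List.nodup_cons.mp hnd).1 (hxc ▸ hct)
      rw [h x List.mem_cons_self hxc]
      have := ih (List.nodup_cons.mp hnd).2 hct
        (fun a ha => h a (List.mem_cons_of_mem _ ha))
      push_cast at this ⊢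
      omega

-- the count A recomputes each step equals the global "both sides" count B maintains
theorem key_count (pre suf : List Char) :
    (PySem.List.dedup pre).countP (fun a => decide (0 < suf.count a)) =
      (PySem.List.dedup (pre ++ suf)).countP (bothP pre suf) := by
  have h1 : (PySem.List.dedup (pre ++ suf)).countP (bothP pre suf) =
      ((PySem.List.dedup (pre ++ suf)).filter (fun c => decide (0 < pre.count c))).countP
        (fun a => decide (0 < suf.count a)) := by
    rw [List.countP_filter]
    apply List.countP_congr
    intro a _
    simp [bothP, Bool.and_comm]
  rw [h1]
  apply List.Perm.countP_eq
  apply (List.perm_ext_iff_of_nodup (PySem.List.nodup_dedup pre)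
    ((PySem.List.nodup_dedup (pre ++ suf)).filter _)).mpr
  intro a
  simp only [List.mem_filter, PySem.List.mem_dedup, List.mem_append, decide_eq_true_eq,
    List.count_pos_iff]
  constructor
  · intro ha; exact ⟨Or.inl ha, ha⟩
  · intro ha; exact ha.2

-- main coupled loop invariant: folding A's step and B's step over the same suffix
-- from related states gives the same result counter
theorem loop_eq (k : Int) :
    ∀ (suf pre : List Char) (rdA ldA : PySem.Dict Char Int) (resA : Int)
      (rB lB : PySem.Dict Char Int) (both resB : Int),
      (∀ a, rdA.getD a 0 = (suf.count a : Int)) →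
      (∀ a, rdA.contains a = decide (0 < suf.count a)) →
      ldA = PySem.Dict.counter pre →
      (∀ a, rB.getD a 0 = (suf.count a : Int)) →
      (∀ a, lB.getD a 0 = (pre.count a : Int)) →
      both = ((PySem.List.dedup (pre ++ suf)).countP (bothP pre suf) : Int) →
      resA = resB →
      (suf.foldl (stepA k) (rdA, ldA, resA)).2.2 =
        (suf.foldl (stepB k) (rB, lB, both, resB)).2.2.2 := by
  intro suf
  induction suf with
  | nil => intro pre rdA ldA resA rB lB both resB _ _ _ _ _ _ hres; simpa using hres
  | cons c rest ih =>
    intro pre rdA ldA resA rB lB both resB hrdg hrdc hld hrB hlB hboth hres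
    simp only [List.foldl_cons]
    have hcnt_c : ((c :: rest).count c : Int) = (rest.count c : Int) + 1 := by
      rw [List.count_cons_self]; push_cast; ring
    -- ===== A's new state =====
    set rd1 := rdA.insert c (rdA.getD c 0 - 1) with hrd1
    have hrd1c : rd1.getD c 0 = (rest.count c : Int) := by
      rw [hrd1, PySem.Dict.getD_insert_self, hrdg c, hcnt_c]; ring
    have hrd1g : ∀ a, a ≠ c → rd1.getD a 0 = (rest.count a : Int) := by
      intro a ha
      rw [hrd1, PySem.Dict.getD_insert, if_neg ha, hrdg a]
      have hca : ¬ c = a := fun h2 => ha h2.symm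
      simp [hca]
    have hrd1cc : ∀ a, rd1.contains a = (a == c || rdA.contains a) := by
      intro a; rw [hrd1, PySem.Dict.contains_insert]
    set rd2 := if rd1.getD c 0 = 0 then rd1.erase c else rd1 with hrd2
    have hrd2g : ∀ a, rd2.getD a 0 = (rest.count a : Int) := by
      intro a
      by_cases hac : a = c
      · rw [hac, hrd2]
        split_ifs with h0
        · rw [getD_erase_self]
          rw [hrd1c] at h0; omega
        · exact hrd1c
      · rw [hrd2]
        split_ifs with h0
        · rw [getD_erase_of_ne _ _ hac]
          exact hrd1g a hac
        · exact hrd1g a hac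
    have hrd2c : ∀ a, rd2.contains a = decide (0 < rest.count a) := by
      intro a
      by_cases hac : a = c
      · rw [hac, hrd2]
        split_ifs with h0
        · rw [contains_erase_self]
          rw [hrd1c] at h0
          have h1 : rest.count c = 0 := by exact_mod_cast h0
          simp [h1]
        · rw [hrd1cc c]
          rw [hrd1c] at h0
          have h1 : 0 < rest.count c := by
            rcases Nat.eq_zero_or_pos (rest.count c) with h2 | h2
            · exact absurd (by exact_mod_cast congrArg (Nat.cast : Nat → Int) h2) h0
            · exact h2
          simp [h1]
      · rw [hrd2]
        have step : rd1.contains a = decide (0 < rest.count a) := by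
          rw [hrd1cc a, hrdc a]
          have hca : ¬ c = a := fun h2 => hac h2.symm
          simp [hac, hca]
        split_ifs with h0
        · rw [contains_erase_of_ne _ hac]; exact step
        · exact step
    -- leftDict
    have hldC : ldA.modify c 0 (· + 1) = PySem.Dict.counter (pre ++ [c]) := by
      rw [hld, PySem.Dict.counter_append_singleton]
    -- A's recomputed count
    have hcount :
        ((ldA.modify c 0 (· + 1)).keys.foldl
            (fun cnt a => if rd2.contains a then cnt + 1 else cnt) (0 : Int)) =
          ((PySem.List.dedup ((pre ++ [c]) ++ rest)).countP (bothP (pre ++ [c]) rest) : Int) := by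
      rw [hldC, PySem.List.foldl_if_add_one (fun a => rd2.contains a), PySem.Dict.keys_counter,
          ← PySem.List.dedup_eq_ofList]
      rw [List.countP_congr (fun a _ => by rw [hrd2c a])]
      rw [key_count (pre ++ [c]) rest]
      ring
    -- ===== B's new both =====
    set lc := lB.getD c 0 with hlc
    set rc := rB.getD c 0 - 1 with hrc
    have hlcv : lc = (pre.count c : Int) := hlB c
    have hrcv : rc = (rest.count c : Int) := by rw [hrc, hrB c, hcnt_c]; ring
    set both' := if lc = 0 ∧ rc > 0 then both + 1
                 else if lc > 0 ∧ rc = 0 then both - 1 else both with hboth'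
    have hbothnew :
        both' = ((PySem.List.dedup ((pre ++ [c]) ++ rest)).countP (bothP (pre ++ [c]) rest) : Int) := by
      have hl : (pre ++ [c]) ++ rest = pre ++ (c :: rest) := by simp
      rw [hl]
      have hmem : c ∈ PySem.List.dedup (pre ++ c :: rest) := by
        rw [PySem.List.mem_dedup]; simp
      have hpt := countP_one_point (PySem.List.nodup_dedup (pre ++ c :: rest)) hmem
        (bothP pre (c :: rest)) (bothP (pre ++ [c]) rest)
        (fun a _ ha => by
          have hca : ¬ c = a := fun h2 => ha h2.symm
          simp [bothP, List.count_append, hca])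
      rw [hpt, ← hboth]
      have hp'c : bothP (pre ++ [c]) rest c = decide (0 < rest.count c) := by
        simp [bothP, List.count_append]
      have hpc : bothP pre (c :: rest) c = decide (0 < pre.count c) := by
        simp [bothP, List.count_cons_self]
      rw [hboth', hp'c, hpc, hlcv, hrcv]
      split_ifs <;> simp only [decide_eq_true_eq] at * <;> omega
    -- ===== apply the induction hypothesis with pre' = pre ++ [c] =====
    have happ := ih (pre ++ [c])
      rd2 (ldA.modify c 0 (· + 1))
      (if ((ldA.modify c 0 (· + 1)).keys.foldl
          (fun cnt a => if rd2.contains a then cnt + 1 else cnt) (0 : Int)) > k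
        then resA + 1 else resA)
      (rB.insert c rc) (lB.insert c (lc + 1)) both'
      (if both' > k then resB + 1 else resB)
      hrd2g hrd2c hldC
      (fun a => by
        rw [PySem.Dict.getD_insert]
        split_ifs with h
        · rw [h]; exact hrcv
        · rw [hrB a]
          have hca : ¬ c = a := fun h2 => h h2.symm
          simp [hca])
      (fun a => by
        rw [PySem.Dict.getD_insert]
        split_ifs with h
        · rw [h, hlcv]
          have h1 : (pre ++ [c]).count c = pre.count c + 1 := by
            simp [List.count_append]
          rw [h1]; push_cast; ring
        · rw [hlB a]
          have hca : ¬ c = a := fun h2 => h h2.symm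
          simp [List.count_append, hca])
      hbothnew
      (by rw [hcount, ← hbothnew, hres])
    -- both folds expand to exactly these states
    show ((rest.foldl (stepA k) (stepA k (rdA, ldA, resA) c))).2.2 =
      ((rest.foldl (stepB k) (stepB k (rB, lB, both, resB) c))).2.2.2
    simp only [stepA, stepB]
    exact happ

-- the initial dictionaries of both programs are the counter of the whole string
theorem findA_unfold (s : String) (k : Int) :
    find s k = (s.toList.foldl (stepA k)
      (PySem.Dict.counter s.toList, PySem.Dict.empty, (0 : Int))).2.2 := by
  simp only [find]
  rw [PySem.List.foldl_pyRange_zero_pyGetD' s.toList ' '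
        (fun (d : PySem.Dict Char Int) (c : Char) => d.modify c 0 (· + 1)) PySem.Dict.empty,
      PySem.List.foldl_pyRange_zero_pyGetD' s.toList ' ' (stepA k)]
  rfl

theorem findB_unfold (s : String) (k : Int) :
    find_alt s k = (s.toList.foldl (stepB k)
      (PySem.Dict.counter s.toList, PySem.Dict.empty, (0 : Int), (0 : Int))).2.2.2 := by
  simp only [find_alt]
  rw [PySem.Dict.foldl_insert_getD_add_one_eq_counter]

-- ===== VERDICT (by name: the statement is the Claim_ definition above) =====
theorem find_spec : Claim_equal_find := by
  intro s k _
  unfold Spec_find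
  rw [findA_unfold, findB_unfold]
  apply loop_eq k s.toList []
  · intro a; rw [PySem.Dict.getD_counter]
  · intro a; rw [PySem.Dict.contains_counter]; simp [List.count_pos_iff]
  · rfl
  · intro a; rw [PySem.Dict.getD_counter]
  · intro a; rw [PySem.Dict.getD_empty]; simp
  · have h0 : (PySem.List.dedup ([] ++ s.toList)).countP (bothP [] s.toList) = 0 := by
      rw [List.countP_eq_zero]
      intro a _
      simp [bothP]
    rw [h0]; rfl
  · rfl
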